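-- pv_equiv track=rewrite | github.com/leeyoshinari/WinHub | mycloud/files/views.py | sort_file_list
-- ===== SOURCE A (Python) =====
-- def sort_file_list(file_list: list) -> list:
--     if len(file_list) == 0:
--         return file_list
--     folder_list = [f for f in file_list if f['format'] == 'ffolder']
--     f_list = [f for f in file_list if f['format'] != 'ffolder']
--     file_type = file_list[0]['format']
--     if file_type == 'ffolder':
--         return folder_list + f_list
--     else:
--         return f_list + folder_list
-- ===== SOURCE B (Python) =====
-- def sort_file_list(file_list: list) -> list:
--     if len(file_list) == 0:
--         return file_list
--     target = file_list[0]['format'] == 'ffolder'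
--     return sorted(file_list, key=lambda f: 0 if (f['format'] == 'ffolder') == target else 1)
-- ===== Notes on version B (the rewrite author's own statement) =====
-- stated objective: idiomatic
-- what changed: Replaces the two filter passes plus conditional concatenation with one stable sort on a binary key that puts the first element's group first.
import Mathlib
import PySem

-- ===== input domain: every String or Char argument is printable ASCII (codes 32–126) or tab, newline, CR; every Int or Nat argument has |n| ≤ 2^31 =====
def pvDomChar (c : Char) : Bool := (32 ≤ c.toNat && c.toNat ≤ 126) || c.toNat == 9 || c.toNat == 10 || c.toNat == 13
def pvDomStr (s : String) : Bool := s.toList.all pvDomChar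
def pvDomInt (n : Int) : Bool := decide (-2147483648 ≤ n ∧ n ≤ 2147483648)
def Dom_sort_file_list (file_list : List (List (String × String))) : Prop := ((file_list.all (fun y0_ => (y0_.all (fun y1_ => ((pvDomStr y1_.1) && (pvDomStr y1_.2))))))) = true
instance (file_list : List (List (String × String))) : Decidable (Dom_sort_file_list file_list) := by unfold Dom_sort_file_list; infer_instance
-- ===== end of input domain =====

-- B replaces A's two filter passes + conditional concatenation with one stable sort
-- on a binary key (idiomatic one-liner; not claimed faster).

-- ===== PORT A =====
def sort_file_list (file_list : List (List (String × String))) : List (List (String × String)) :=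
  if file_list.length = 0 then file_list
  else
    let folder_list := file_list.filter (fun f => PySem.Dict.getD ⟨f⟩ "format" "" == "ffolder")
    let f_list := file_list.filter (fun f => PySem.Dict.getD ⟨f⟩ "format" "" != "ffolder")
    let file_type := PySem.Dict.getD ⟨PySem.List.pyGetD file_list 0 []⟩ "format" ""
    if file_type == "ffolder" then folder_list ++ f_list
    else f_list ++ folder_list

-- ===== PORT B =====
def sort_file_list_alt (file_list : List (List (String × String))) : List (List (String × String)) :=
  if file_list.length = 0 then file_list
  else
    let target := PySem.Dict.getD ⟨PySem.List.pyGetD file_list 0 []⟩ "format" "" == "ffolder"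
    PySem.List.sorted file_list
      (fun f => if (PySem.Dict.getD ⟨f⟩ "format" "" == "ffolder") == target then (0 : Int) else 1)
      false

-- ===== PRECONDITION & SPEC =====
-- Pre_ excludes exactly the inputs on which A raises KeyError: a dict without a 'format' key.
def Pre_sort_file_list (file_list : List (List (String × String))) : Prop :=
  ∀ f ∈ file_list, (PySem.Dict.get? (⟨f⟩ : PySem.Dict String String) "format").isSome = true
instance (file_list : List (List (String × String))) : Decidable (Pre_sort_file_list file_list) := by
  unfold Pre_sort_file_list; infer_instance

def pvWitness_sort_file_list : (List (List (String × String))) :=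
  [[("format", "ffolder"), ("name", "a")], [("format", "txt"), ("name", "b")]]

def Spec_sort_file_list (file_list : List (List (String × String))) (out : List (List (String × String))) : Prop := out = sort_file_list_alt file_list
instance (file_list : List (List (String × String))) (out : List (List (String × String))) : Decidable (Spec_sort_file_list file_list out) := by unfold Spec_sort_file_list; infer_instance

-- ===== CLAIM (what is proved, stated in full; the proofs are below) =====
def Claim_equal_sort_file_list : Prop := ∀ (file_list : List (List (String × String))), Dom_sort_file_list file_list → Pre_sort_file_list file_list → Spec_sort_file_list file_list (sort_file_list file_list)

-- ===== LEMMAS AND PROOFS =====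

-- Inserting into a block of key-0 elements followed by a block of key-1 elements
-- keeps the blocks: a key-0 element lands at the end of the first block, a key-1
-- element at the very end (this is exactly insertion-sort stability on a binary key).
theorem insertBy_binary {α : Type} (p : α → Bool) (x : α) (A B : List α)
    (hA : ∀ a ∈ A, p a = true) (hB : ∀ b ∈ B, p b = false) :
    PySem.List.insertBy
      (fun a b => decide ((if p a then (0 : Int) else 1) < (if p b then (0 : Int) else 1)))
      x (A ++ B) =
    if p x then A ++ x :: B else (A ++ B) ++ [x] := by
  induction A with
  | nil =>
    simp only [List.nil_append]
    induction B with
    | nil => by_cases hx : p x <;> simp [PySem.List.insertBy, hx]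
    | cons b bs ih =>
      have hb : p b = false := hB b (by simp)
      by_cases hx : p x
      · simp [PySem.List.insertBy, hx, hb]
      · simp only [PySem.List.insertBy, hx]
        simp only [hb]
        simp only [List.cons_append]
        have := ih (fun c hc => hB c (by simp [hc]))
        simp [hx] at this
        simp [this]
  | cons a as ih =>
    have ha : p a = true := hA a (by simp)
    have hkey : ((if p x then (0:Int) else 1) < (if p a then (0:Int) else 1)) = False := by
      by_cases hx : p x <;> simp [hx, ha]
    simp only [List.cons_append, PySem.List.insertBy, hkey, decide_false,
      Bool.false_eq_true, if_false]
    rw [ih (fun c hc => hA c (by simp [hc]))]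
    by_cases hx : p x <;> simp [hx]

-- Insertion sort with a binary 0/1 key is the stable two-way partition.
theorem foldl_insertBy_binary {α : Type} (p : α → Bool) (xs A B : List α)
    (hA : ∀ a ∈ A, p a = true) (hB : ∀ b ∈ B, p b = false) :
    xs.foldl (fun acc x => PySem.List.insertBy
      (fun a b => decide ((if p a then (0 : Int) else 1) < (if p b then (0 : Int) else 1)))
      x acc) (A ++ B) =
    (A ++ xs.filter p) ++ (B ++ xs.filter (fun x => !p x)) := by
  induction xs generalizing A B with
  | nil => simp
  | cons x xs ih =>
    simp only [List.foldl_cons]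
    rw [insertBy_binary p x A B hA hB]
    by_cases hx : p x
    · rw [if_pos hx]
      have := ih (A ++ [x]) B
        (by intro a ha; rcases List.mem_append.1 ha with h | h
            · exact hA a h
            · simp at h; subst h; exact hx) hB
      simpa [hx, List.append_assoc] using this
    · rw [if_neg hx]
      have := ih A (B ++ [x]) hA
        (by intro b hb; rcases List.mem_append.1 hb with h | h
            · exact hB b h
            · simp at h; subst h; simpa using hx)
      simpa [hx, List.append_assoc] using this

theorem sorted_binary {α : Type} (p : α → Bool) (xs : List α) :
    PySem.List.sorted xs (fun x => if p x then (0 : Int) else 1) false =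
    xs.filter p ++ xs.filter (fun x => !p x) := by
  rw [PySem.List.sorted_eq_foldl_insertBy]
  simpa using foldl_insertBy_binary p xs [] [] (by simp) (by simp)

-- ===== VERDICT (by name: the statement is the Claim_ definition above) =====
theorem sort_file_list_spec : Claim_equal_sort_file_list := by
  intro file_list _ _
  unfold Spec_sort_file_list sort_file_list sort_file_list_alt
  by_cases hnil : file_list.length = 0
  · simp [hnil]
  · simp only [if_neg hnil]
    set q : List (String × String) → Bool :=
      fun f => PySem.Dict.getD ⟨f⟩ "format" "" == "ffolder" with hq
    by_cases ht : PySem.Dict.getD (⟨PySem.List.pyGetD file_list 0 []⟩ : PySem.Dict String String) "format" "" == "ffolder"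
    · -- first element is a folder: key = if q f then 0 else 1
      rw [if_pos ht]
      have : (fun f : List (String × String) =>
          if (PySem.Dict.getD ⟨f⟩ "format" "" == "ffolder")
              == (PySem.Dict.getD (⟨PySem.List.pyGetD file_list 0 []⟩ : PySem.Dict String String) "format" "" == "ffolder")
          then (0 : Int) else 1)
          = fun f => if q f then (0 : Int) else 1 := by
        funext f; simp [hq, ht]
      rw [this, sorted_binary q file_list]
      congr 1
    · -- first element is not a folder: key = if !q f then 0 else 1
      rw [if_neg ht]
      have : (fun f : List (String × String) =>
          if (PySem.Dict.getD ⟨f⟩ "format" "" == "ffolder")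
              == (PySem.Dict.getD (⟨PySem.List.pyGetD file_list 0 []⟩ : PySem.Dict String String) "format" "" == "ffolder")
          then (0 : Int) else 1)
          = fun f => if (!q f) then (0 : Int) else 1 := by
        funext f
        simp only [hq, Bool.eq_false_iff.2 ht] at *
        cases h : (PySem.Dict.getD (⟨f⟩ : PySem.Dict String String) "format" "" == "ffolder") <;>
          simp
      rw [this, sorted_binary (fun f => !q f) file_list]
      congr 1
      apply List.filter_congr; intro f _; simp [hq]
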